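-- pv_equiv track=rewrite | github.com/minhphuoc2672006-hash/Tool_ai_mb5 | ai.py | streak_predict
-- ===== SOURCE A (Python) =====
-- def streak_predict(data):
--
--     if len(data) < 4:
--         return None
--
--     last = data[-1]
--
--     streak = 1
--
--     for i in range(len(data)-2, -1, -1):
--
--         if data[i] == last:
--             streak += 1
--         else:
--             break
--
--     if streak >= 3:
--         return last
--
--     return None
-- ===== SOURCE B (Python) =====
-- from itertools import groupby
--
-- def streak_predict(data):
--     if len(data) < 4:
--         return None
--     last_key = last_len = None
--     for k, g in groupby(data):
--         last_key, last_len = k, sum(1 for _ in g)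
--     return last_key if last_len >= 3 else None
-- ===== Notes on version B (the rewrite author's own statement) =====
-- stated objective: idiomatic
-- what changed: Replaces the backward index loop with an early break by a single forward itertools.groupby pass that keeps the last run's key and length.
import Mathlib
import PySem

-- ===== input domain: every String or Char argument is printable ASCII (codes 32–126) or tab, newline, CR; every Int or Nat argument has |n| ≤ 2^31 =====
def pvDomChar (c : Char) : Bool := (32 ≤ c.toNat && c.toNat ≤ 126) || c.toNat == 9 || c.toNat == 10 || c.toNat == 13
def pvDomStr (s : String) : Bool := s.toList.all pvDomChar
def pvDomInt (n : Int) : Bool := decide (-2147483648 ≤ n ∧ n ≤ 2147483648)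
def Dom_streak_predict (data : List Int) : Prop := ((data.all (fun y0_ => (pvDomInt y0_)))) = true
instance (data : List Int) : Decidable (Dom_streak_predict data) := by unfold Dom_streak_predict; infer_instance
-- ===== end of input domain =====

-- B replaces A's backward index loop (with break) by one forward groupby pass keeping the
-- last run's key and length; same return value everywhere (idiomatic rewrite, no speed claim).

-- ===== PORT A =====
-- the backward 'for i in range(len(data)-2, -1, -1)' loop with its break:
-- walks the index list, adding 1 to streak while data[i] == last, stopping at the first mismatch
def pvALoop (data : List Int) (last : Int) : List Int → Int → Int
  | [], s => s
  | i :: rest, s =>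
    if PySem.List.pyGet? data i = some last then pvALoop data last rest (s + 1) else s

def streak_predict (data : List Int) : Option Int :=
  if data.length < 4 then none
  else
    match PySem.List.pyGet? data (-1) with
    | none => none
    | some last =>
      let streak := pvALoop data last (PySem.List.pyRange ((data.length : Int) - 2) (-1) (-1)) 1
      if streak ≥ 3 then some last else none

-- ===== PORT B =====
-- itertools.groupby(data): the list of (key, run length) pairs of consecutive equal runs
def pvRunsAux : List Int → Int → Int → List (Int × Int)
  | [], k, c => [(k, c)]
  | x :: xs, k, c => if x = k then pvRunsAux xs k (c + 1) else (k, c) :: pvRunsAux xs x 1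

def pvRuns : List Int → List (Int × Int)
  | [] => []
  | x :: xs => pvRunsAux xs x 1

def streak_predict_alt (data : List Int) : Option Int :=
  if data.length < 4 then none
  else
    -- the Source B loop over groupby keeps only the final (key, length) pair
    match (pvRuns data).getLast? with
    | none => none
    | some (k, c) => if c ≥ 3 then some k else none

-- ===== PRECONDITION & SPEC =====
def Spec_streak_predict (data : List Int) (out : Option Int) : Prop := out = streak_predict_alt data
instance (data : List Int) (out : Option Int) : Decidable (Spec_streak_predict data out) := by unfold Spec_streak_predict; infer_instance

-- ===== CLAIM (what is proved, stated in full; the proofs are below) =====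
def Claim_equal_streak_predict : Prop := ∀ (data : List Int), Dom_streak_predict data → Spec_streak_predict data (streak_predict data)

-- ===== LEMMAS AND PROOFS =====

-- leading count of elements equal to m (length of the leading run of m's)
def pvTcnt (m : Int) : List Int → Int
  | [] => 0
  | x :: xs => if x = m then 1 + pvTcnt m xs else 0

theorem pvTcnt_append_stop (m k : Int) (t : List Int)
    (r : List Int) (h : (∀ y ∈ r, y = m) → k ≠ m) :
    pvTcnt m (r ++ k :: t) = pvTcnt m r := by
  induction r with
  | nil => simp [pvTcnt, h (by simp)]
  | cons x xs ih =>
    by_cases hx : x = m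
    · simp only [List.cons_append, pvTcnt, if_pos hx]
      rw [ih (fun hall => h (fun y hy => by
        rcases List.mem_cons.mp hy with h1 | h2
        · omega
        · exact hall y h2))]
    · simp [pvTcnt, hx]

theorem pvTcnt_all (m : Int) (r : List Int) (h : ∀ y ∈ r, y = m) :
    pvTcnt m r = r.length := by
  induction r with
  | nil => simp [pvTcnt]
  | cons x xs ih =>
    have hx : x = m := h x (by simp)
    simp [pvTcnt, hx, ih (fun y hy => h y (by simp [hy]))]
    omega

-- getLast? of pvRunsAux: the last run of pre ++ k :: xs, where pre are already-consumed
-- copies of k counted in the accumulator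
theorem pvGetLast?_cons_of_ne_nil (p : Int × Int) (l : List (Int × Int)) (h : l ≠ []) :
    (p :: l).getLast? = l.getLast? := by
  cases l with
  | nil => exact absurd rfl h
  | cons q t => simp [List.getLast?_cons_cons]

theorem pvRunsAux_ne_nil (xs : List Int) (k c : Int) : pvRunsAux xs k c ≠ [] := by
  induction xs generalizing k c with
  | nil => simp [pvRunsAux]
  | cons x xs ih =>
    simp only [pvRunsAux]
    split
    · exact ih _ _
    · simp

theorem pvRunsAux_getLast (xs : List Int) (k : Int) (pre : List Int)
    (hpre : ∀ y ∈ pre, y = k) :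
    ∀ m r, (pre ++ k :: xs).reverse = m :: r →
      (pvRunsAux xs k (1 + pre.length)).getLast? = some (m, 1 + pvTcnt m r) := by
  induction xs generalizing k pre with
  | nil =>
    intro m r hrev
    have : (pre ++ [k]).reverse = k :: pre.reverse := by simp
    rw [this] at hrev
    obtain ⟨hm, hr⟩ : k = m ∧ pre.reverse = r := by
      exact ⟨(List.cons.injEq _ _ _ _ ▸ hrev).1, (List.cons.injEq _ _ _ _ ▸ hrev).2⟩
    subst hm; subst hr
    simp [pvRunsAux, pvTcnt_all k pre.reverse (by simpa using hpre)]
  | cons x xs ih =>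
    intro m r hrev
    simp only [pvRunsAux]
    by_cases hx : x = k
    · rw [if_pos hx]
      have h1 : (1 : Int) + (pre ++ [x]).length = 1 + pre.length + 1 := by simp; omega
      have h2 : (pre ++ [x]) ++ k :: xs = pre ++ k :: x :: xs := by
        subst hx; simp
      have := ih k (pre ++ [x])
        (by intro y hy; rcases List.mem_append.mp hy with h' | h'
            · exact hpre y h'
            · simpa [hx] using h') m r (by rw [h2]; exact hrev)
      rw [h1] at this; exact this
    · rw [if_neg hx]
      have hne := pvRunsAux_ne_nil xs x 1
      rw [pvGetLast?_cons_of_ne_nil _ _ hne]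
      -- apply ih with k := x, pre := []
      rcases hxs : (x :: xs).reverse with _ | ⟨m', r'⟩
      · exact absurd hxs (by simp)
      · have hbig : (pre ++ k :: x :: xs).reverse = m' :: (r' ++ k :: pre.reverse) := by
          rw [show pre ++ k :: x :: xs = (pre ++ [k]) ++ (x :: xs) by simp]
          rw [List.reverse_append, hxs]
          simp
        rw [hbig] at hrev
        obtain ⟨hm, hr⟩ : m' = m ∧ r' ++ k :: pre.reverse = r :=
          ⟨(List.cons.injEq _ _ _ _ ▸ hrev).1, (List.cons.injEq _ _ _ _ ▸ hrev).2⟩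
        have := ih x [] (by simp) m' r' (by simpa using hxs)
        simp only [List.length_nil] at this
        rw [show (1 : Int) + (0 : Nat) = 1 by norm_num] at this
        rw [this]
        -- pvTcnt m r = pvTcnt m r' : the count stops inside r' or at the k
        have hstop : pvTcnt m (r' ++ k :: pre.reverse) = pvTcnt m r' := by
          apply pvTcnt_append_stop
          intro hall
          -- if all of r' equal m then x :: xs is constant m, so x = m, and x ≠ k
          have hxm : x = m := by
            have hmem : x ∈ m' :: r' := by
              rw [← hxs]; simp
            rcases List.mem_cons.mp hmem with h' | h'
            · omega
            · exact hall x h'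
          intro hk; exact hx (by omega)
        rw [← hr, hstop, hm]

-- A's loop over range(k-1, -1, -1) counts the leading run of (data.take k).reverse
theorem pvALoop_spec (data : List Int) (last : Int) :
    ∀ (k : Nat), k ≤ data.length → ∀ s,
      pvALoop data last (PySem.List.pyRange ((k : Int) - 1) (-1) (-1)) s
        = s + pvTcnt last (data.take k).reverse := by
  intro k
  induction k with
  | zero =>
    intro _ s
    rw [PySem.List.pyRange_neg_one_eq_nil (by norm_num)]
    simp [pvALoop, pvTcnt]
  | succ k ih =>
    intro hk s
    have hk' : k < data.length := by omega
    have hcast : ((k + 1 : Nat) : Int) - 1 = (k : Int) := by push_cast; ring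
    rw [hcast]
    rw [PySem.List.pyRange_neg_one_cons (by omega)]
    simp only [pvALoop]
    have hget : PySem.List.pyGet? data (k : Int) = some (data[k]'hk') := by
      simp [hk']
    have htake : (data.take (k + 1)).reverse = data[k]'hk' :: (data.take k).reverse := by
      rw [List.take_add_one]
      simp [List.getElem?_eq_getElem hk']
    rw [hget, htake]
    by_cases hlast : data[k]'hk' = last
    · rw [if_pos (by rw [hlast])]
      rw [show ((k : Nat) : Int) - 1 = ((k : Int) - 1) by norm_num]
      rw [ih (by omega) (s + 1)]
      simp [pvTcnt, hlast]
      ring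
    · rw [if_neg (by simpa using (fun h : data[k]'hk' = last => hlast h))]
      simp [pvTcnt, hlast]

theorem streak_predict_eq (data : List Int) : streak_predict data = streak_predict_alt data := by
  by_cases hlen : data.length < 4
  · simp [streak_predict, streak_predict_alt, hlen]
  · have hne : data ≠ [] := by
      intro h; subst h; simp at hlen
    obtain ⟨m, r, hrev⟩ : ∃ m r, data.reverse = m :: r := by
      cases h : data.reverse with
      | nil => exact absurd (by simpa using h) hne
      | cons a l => exact ⟨a, l, rfl⟩
    -- data = (data.dropLast) ++ [m], m = getLast
    have hdata : data = r.reverse ++ [m] := by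
      have := congrArg List.reverse hrev
      simpa using this
    -- A side: pyGet? data (-1) = some m
    have hneg : PySem.List.pyGet? data (-1) = some m := by
      rw [hdata]
      exact PySem.List.pyGet?_neg_one_append_singleton _ _
    -- data.take (data.length - 1) = r.reverse
    have htake : data.take (data.length - 1) = r.reverse := by
      conv_lhs => rw [hdata]
      simp
    have hloop := pvALoop_spec data m (data.length - 1) (by omega) 1
    rw [htake] at hloop
    rw [show ((((data.length - 1 : Nat)) : Int) - 1) = ((data.length : Int) - 2) by omega] at hloop
    simp only [List.reverse_reverse] at hloop
    -- B side
    obtain ⟨d, rest, hd⟩ : ∃ d rest, data = d :: rest := by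
      cases data with
      | nil => exact absurd rfl hne
      | cons d rest => exact ⟨d, rest, rfl⟩
    have hB : (pvRuns data).getLast? = some (m, 1 + pvTcnt m r) := by
      rw [hd]
      simp only [pvRuns]
      have := pvRunsAux_getLast rest d [] (by simp) m r (by rw [← hd]; simpa using hrev)
      simpa using this
    simp only [streak_predict, streak_predict_alt, if_neg hlen, hneg, hB, hloop]

-- ===== VERDICT (by name: the statement is the Claim_ definition above) =====
theorem streak_predict_spec : Claim_equal_streak_predict := by
  intro data _
  unfold Spec_streak_predict
  exact streak_predict_eq data
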